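-- pv_equiv track=rewrite | github.com/qrakryk/1000dice | header.py | calculateStandard
-- ===== SOURCE A (Python) =====
-- def calculateStandard(throw):
--   points=0
--   for i in throw:
--     if i == 1:
--       points+=100
--     elif i == 5:
--       points+=50
--   return points
-- ===== SOURCE B (Python) =====
-- def calculateStandard(throw):
--   t = list(throw)
--   n = len(t)
--   if n == 0:
--     return 0
--   if n == 1:
--     x = t[0]
--     return 100 if x == 1 else 50 if x == 5 else 0
--   mid = n // 2
--   return calculateStandard(t[:mid]) + calculateStandard(t[mid:])
-- ===== Notes on version B (the rewrite author's own statement) =====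
-- stated objective: alternative
-- what changed: Replaces the single-pass accumulator loop by a divide-and-conquer recursion: split the throw in half, score each half recursively and add, with a base case scoring one die.
import Mathlib
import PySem

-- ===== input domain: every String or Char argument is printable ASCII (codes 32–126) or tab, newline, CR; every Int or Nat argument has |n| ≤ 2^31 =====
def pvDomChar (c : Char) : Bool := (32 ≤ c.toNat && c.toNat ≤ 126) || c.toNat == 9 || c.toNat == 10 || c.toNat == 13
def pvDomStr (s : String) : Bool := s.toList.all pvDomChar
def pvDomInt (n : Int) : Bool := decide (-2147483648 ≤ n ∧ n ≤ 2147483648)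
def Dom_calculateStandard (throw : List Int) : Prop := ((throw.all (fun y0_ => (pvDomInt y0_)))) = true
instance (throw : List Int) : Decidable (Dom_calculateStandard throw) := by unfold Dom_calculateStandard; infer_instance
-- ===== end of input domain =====

-- B scores the throw by divide-and-conquer (split in half, recurse, add) instead of A's accumulator loop (alternative; same result).

-- ===== PORT A =====
def calculateStandard (throw : List Int) : Int :=
  throw.foldl (fun points i =>
    if i == 1 then points + 100
    else if i == 5 then points + 50
    else points) 0

-- ===== PORT B =====
-- t[:mid] / t[mid:] with 0 ≤ mid ≤ n are exactly List.take / List.drop.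
def calculateStandard_alt (throw : List Int) : Int :=
  match throw with
  | [] => 0
  | [x] => if x == 1 then 100 else if x == 5 then 50 else 0
  | a :: b :: rest =>
    let t := a :: b :: rest
    let mid := t.length / 2
    calculateStandard_alt (t.take mid) + calculateStandard_alt (t.drop mid)
termination_by throw.length
decreasing_by
  · simp [List.length_take]; omega
  · simp; omega

-- ===== PRECONDITION & SPEC =====
def Spec_calculateStandard (throw : List Int) (out : Int) : Prop := out = calculateStandard_alt throw
instance (throw : List Int) (out : Int) : Decidable (Spec_calculateStandard throw out) := by unfold Spec_calculateStandard; infer_instance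

-- ===== CLAIM (what is proved, stated in full; the proofs are below) =====
def Claim_equal_calculateStandard : Prop := ∀ (throw : List Int), Dom_calculateStandard throw → Spec_calculateStandard throw (calculateStandard throw)

-- ===== LEMMAS AND PROOFS =====
theorem calcStd_eq_counts (throw : List Int) :
    calculateStandard throw = 100 * (throw.count 1 : Int) + 50 * (throw.count 5 : Int) := by
  unfold calculateStandard
  induction throw using List.reverseRecOn with
  | nil => simp
  | append_singleton xs x ih =>
    simp only [List.foldl_append, List.foldl_cons, List.foldl_nil, ih, List.count_append,
      List.count_singleton]
    by_cases h1 : x = 1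
    · subst h1; simp; ring
    · by_cases h5 : x = 5
      · subst h5; simp; ring
      · simp [h1, h5]

theorem calcStd_alt_eq_counts (throw : List Int) :
    calculateStandard_alt throw = 100 * (throw.count 1 : Int) + 50 * (throw.count 5 : Int) := by
  induction throw using calculateStandard_alt.induct with
  | case1 => simp [calculateStandard_alt]
  | case2 x h1 => simp_all [calculateStandard_alt]
  | case3 x h1 h5 => simp_all [calculateStandard_alt]
  | case4 x h1 h5 => simp_all [calculateStandard_alt]
  | case5 a b rest _t _mid ih1 ih2 =>
    rw [calculateStandard_alt, ih1, ih2]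
    conv_rhs => rw [← List.take_append_drop ((a :: b :: rest).length / 2) (a :: b :: rest)]
    push_cast [List.count_append]
    ring

-- ===== VERDICT (by name: the statement is the Claim_ definition above) =====
theorem calculateStandard_spec : Claim_equal_calculateStandard := by
  intro throw _
  unfold Spec_calculateStandard
  rw [calcStd_eq_counts, calcStd_alt_eq_counts]
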